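-- pv_equiv track=rewrite | github.com/wakr/MSc-Thesis | src/evaluation/scap.py | decide_nearest
-- ===== SOURCE A (Python) =====
-- def decide_nearest(profiles_, document_profile):
--     sims = [] # id, sim
--     for k in profiles_.keys():
--         ngrams = profiles_[k]
--         size_of_intersect = 0
--         for ng1 in ngrams:
--             for ng2 in document_profile:
--                 if ng1 == ng2:
--                     size_of_intersect = size_of_intersect + 1
--         sims.append((k, size_of_intersect))
--     sorted_by_second = sorted(sims, key=lambda tup: tup[1], reverse=True)
--     return sorted_by_second
-- ===== SOURCE B (Python) =====
-- def decide_nearest(profiles_, document_profile):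
--     doc = sorted(document_profile)
--     sims = []
--     for k, ngrams in profiles_.items():
--         ng = sorted(ngrams)
--         i = j = 0
--         sim = 0
--         while i < len(ng) and j < len(doc):
--             if ng[i] < doc[j]:
--                 i += 1
--             elif doc[j] < ng[i]:
--                 j += 1
--             else:
--                 r = j
--                 while r < len(doc) and doc[r] == ng[i]:
--                     r += 1
--                 sim += r - j
--                 i += 1
--         sims.append((k, sim))
--     return sorted(sims, key=lambda tup: tup[1], reverse=True)
-- ===== Notes on version B (the rewrite author's own statement) =====
-- stated objective: alternative
-- what changed: B sorts the document once and each profile's ngram list, then scores with a two-pointer merge over the two sorted lists (adding the document run length at each match), replacing A's nested ngram-by-ngram scan.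
import Mathlib
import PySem

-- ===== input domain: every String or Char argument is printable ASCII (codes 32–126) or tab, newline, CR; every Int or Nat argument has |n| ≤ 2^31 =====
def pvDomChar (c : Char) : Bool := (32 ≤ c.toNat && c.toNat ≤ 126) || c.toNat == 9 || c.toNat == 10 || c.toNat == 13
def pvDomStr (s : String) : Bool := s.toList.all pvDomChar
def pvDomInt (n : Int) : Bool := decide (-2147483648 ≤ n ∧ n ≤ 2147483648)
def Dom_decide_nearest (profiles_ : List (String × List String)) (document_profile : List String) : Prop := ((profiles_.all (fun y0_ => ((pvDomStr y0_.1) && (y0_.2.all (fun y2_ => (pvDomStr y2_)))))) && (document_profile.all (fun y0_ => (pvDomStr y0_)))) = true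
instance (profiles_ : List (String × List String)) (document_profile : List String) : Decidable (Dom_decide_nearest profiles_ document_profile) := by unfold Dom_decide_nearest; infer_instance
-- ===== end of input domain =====

-- B sorts the document once and each profile's ngram list and scores with a two-pointer
-- merge over the sorted lists, replacing A's nested ngram-by-ngram scan (objective: alternative).

-- ===== PORT A =====
-- profiles_[k]: first-match association-list lookup; exact for a Python dict, whose keys are
-- unique (Pre_ below). The 'none' branch is unreachable for keys drawn from the dict itself.
def pyDictGetA (profiles_ : List (String × List String)) (k : String) : List String :=
  match profiles_.find? (fun p => p.1 == k) with
  | some p => p.2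
  | none => []

-- sims: one (k, size_of_intersect) per key, size via the nested ng1/ng2 loops
def decide_nearest (profiles_ : List (String × List String)) (document_profile : List String) : List (String × Int) :=
  PySem.List.sorted
    ((profiles_.map Prod.fst).map (fun k =>
      (k, (pyDictGetA profiles_ k).foldl (fun s ng1 =>
            document_profile.foldl (fun s ng2 => if ng1 == ng2 then s + 1 else s) s) (0 : Int))))
    (fun tup => tup.2) true

-- ===== PORT B =====
-- the two-pointer merge: advance the side with the smaller head; on a match count the
-- document run (the inner 'while r' loop, = takeWhile) and advance the profile pointer
def pvMerge : List String → List String → Int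
  | [], _ => 0
  | _ :: _, [] => 0
  | a :: as, b :: bs =>
    if a < b then pvMerge as (b :: bs)
    else if b < a then pvMerge (a :: as) bs
    else (((b :: bs).takeWhile (fun x => x == a)).length : Int) + pvMerge as (b :: bs)
  termination_by a b => (a.length, b.length)

def decide_nearest_alt (profiles_ : List (String × List String)) (document_profile : List String) : List (String × Int) :=
  let doc := PySem.List.sorted document_profile (fun x => x) false
  PySem.List.sorted
    (profiles_.map (fun kv =>
      (kv.1, pvMerge (PySem.List.sorted kv.2 (fun x => x) false) doc)))
    (fun tup => tup.2) true

-- ===== PRECONDITION & SPEC =====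
-- Pre_ only requires distinct keys: the argument models a Python dict, which can never carry
-- duplicate keys, so no input A accepts is excluded.
def Pre_decide_nearest (profiles_ : List (String × List String)) (document_profile : List String) : Prop :=
  (profiles_.map Prod.fst).Nodup

instance (profiles_ : List (String × List String)) (document_profile : List String) : Decidable (Pre_decide_nearest profiles_ document_profile) := by unfold Pre_decide_nearest; infer_instance

def pvWitness_decide_nearest : (List (String × List String)) × List String :=
  ([("p1", ["ab", "bc"]), ("p2", ["bc"])], ["bc", "bc", "xy"])

def Spec_decide_nearest (profiles_ : List (String × List String)) (document_profile : List String) (out : List (String × Int)) : Prop := out = decide_nearest_alt profiles_ document_profile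
instance (profiles_ : List (String × List String)) (document_profile : List String) (out : List (String × Int)) : Decidable (Spec_decide_nearest profiles_ document_profile out) := by unfold Spec_decide_nearest; infer_instance

-- ===== CLAIM (what is proved, stated in full; the proofs are below) =====
def Claim_equal_decide_nearest : Prop := ∀ (profiles_ : List (String × List String)) (document_profile : List String), Dom_decide_nearest profiles_ document_profile → Pre_decide_nearest profiles_ document_profile → Spec_decide_nearest profiles_ document_profile (decide_nearest profiles_ document_profile)

-- ===== LEMMAS AND PROOFS =====

-- inner loop of A counts occurrences of ng1 in the document
theorem pv_inner_count (ng1 : String) (doc : List String) (s : Int) :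
    doc.foldl (fun s ng2 => if ng1 == ng2 then s + 1 else s) s = s + (doc.count ng1 : Int) := by
  induction doc generalizing s with
  | nil => simp
  | cons d t ih =>
    simp only [List.foldl]
    rw [ih]
    by_cases h : ng1 = d
    · simp [List.count_cons, h]; ring
    · have h' : (d == ng1) = false := by simpa using Ne.symm h
      simp [List.count_cons, h', beq_iff_eq, h]

-- A's per-profile score as a sum of document counts
theorem pv_score_sum (ngrams doc : List String) :
    ngrams.foldl (fun s ng1 =>
        doc.foldl (fun s ng2 => if ng1 == ng2 then s + 1 else s) s) (0 : Int)
    = ((ngrams.map fun x => (doc.count x : Int)).sum) := by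
  have h : ∀ (l : List String) (s : Int),
      l.foldl (fun s ng1 => doc.foldl (fun s ng2 => if ng1 == ng2 then s + 1 else s) s) s
        = s + ((l.map fun x => (doc.count x : Int)).sum) := by
    intro l
    induction l with
    | nil => intro s; simp
    | cons a t ih =>
      intro s
      simp only [List.foldl, List.map, List.sum_cons]
      rw [pv_inner_count, ih]
      ring
  simpa using h ngrams 0

-- in a sorted list all of whose elements are ≥ a, count a = length of the leading run of a
theorem pv_run_count (a : String) (l : List String) (hl : l.Pairwise (· ≤ ·))
    (hge : ∀ x ∈ l, a ≤ x) :
    (l.count a : Int) = ((l.takeWhile (fun x => x == a)).length : Int) := by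
  induction l with
  | nil => simp
  | cons b bs ih =>
    rcases List.pairwise_cons.mp hl with ⟨hble, htail⟩
    by_cases hab : b = a
    · subst hab
      have hge' : ∀ x ∈ bs, b ≤ x := fun x hx => hble x hx
      have := ih htail hge'
      simp [List.count_cons, List.takeWhile]
      omega
    · have hlt : a < b := lt_of_le_of_ne (hge b (List.mem_cons_self)) (Ne.symm hab)
      have hzero : (b :: bs).count a = 0 := by
        rw [List.count_eq_zero]
        intro hmem
        rcases List.mem_cons.mp hmem with h | h
        · exact hab h.symm
        · exact absurd (lt_of_lt_of_le hlt (hble a h)) (lt_irrefl a)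
      have hbne : (b == a) = false := by simpa using hab
      simp [hzero, List.takeWhile, hbne]

-- the merge of two sorted lists computes the sum of document counts
theorem pv_merge_eq (a b : List String) (ha : a.Pairwise (· ≤ ·)) (hb : b.Pairwise (· ≤ ·)) :
    pvMerge a b = ((a.map fun x => (b.count x : Int)).sum) := by
  induction a, b using pvMerge.induct with
  | case1 b => simp [pvMerge]
  | case2 a as => simp [pvMerge]
  | case3 a as b bs hab ih =>
    rcases List.pairwise_cons.mp ha with ⟨hale, hatail⟩
    rcases List.pairwise_cons.mp hb with ⟨hble, _⟩
    have hzero : (b :: bs).count a = 0 := by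
      rw [List.count_eq_zero]
      intro hmem
      have : b ≤ a := by
        rcases List.mem_cons.mp hmem with h | h
        · exact le_of_eq h.symm
        · exact hble a h
      exact absurd (lt_of_lt_of_le hab this) (lt_irrefl a)
    rw [pvMerge, if_pos hab, ih hatail hb]
    simp [hzero]
  | case4 a as b bs hab hba ih =>
    rcases List.pairwise_cons.mp hb with ⟨hble, hbtail⟩
    rw [pvMerge, if_neg hab, if_pos hba, ih ha hbtail]
    apply congrArg
    apply List.map_congr_left
    intro x hx
    have hax : a ≤ x := by
      rcases List.mem_cons.mp hx with h | h
      · exact le_of_eq h.symm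
      · exact (List.pairwise_cons.mp ha).1 x h
    have hbx : (b == x) = false := by
      have : b ≠ x := ne_of_lt (lt_of_lt_of_le hba hax)
      simpa using this
    simp [List.count_cons, hbx]
  | case5 a as b bs hab hba ih =>
    rcases List.pairwise_cons.mp ha with ⟨hale, hatail⟩
    have haleb : a ≤ b := le_of_not_gt hba
    have hblea : b ≤ a := le_of_not_gt hab
    have hge : ∀ x ∈ b :: bs, a ≤ x := by
      intro x hx
      rcases List.mem_cons.mp hx with h | h
      · subst h; exact haleb
      · exact le_trans haleb ((List.pairwise_cons.mp hb).1 x h)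
    rw [pvMerge, if_neg hab, if_neg hba, ih hatail hb]
    rw [← pv_run_count a (b :: bs) hb hge]
    simp

-- with unique keys, A's dict lookup of a present entry returns that entry's value
theorem pv_find_self (profiles_ : List (String × List String)) (kv : String × List String)
    (hnd : (profiles_.map Prod.fst).Nodup) (hmem : kv ∈ profiles_) :
    pyDictGetA profiles_ kv.1 = kv.2 := by
  induction profiles_ with
  | nil => cases hmem
  | cons p t ih =>
    simp only [List.map_cons, List.nodup_cons] at hnd
    rcases List.mem_cons.mp hmem with h | h
    · subst h
      simp [pyDictGetA, List.find?]
    · have hne : (p.1 == kv.1) = false := by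
        have : p.1 ≠ kv.1 := by
          intro he
          exact hnd.1 (he ▸ List.mem_map_of_mem h)
        simpa [beq_iff_eq] using this
      have := ih hnd.2 h
      simpa [pyDictGetA, List.find?, hne] using this

-- A's score equals B's merge score (sorting changes neither the sum nor the counts)
theorem pv_score_eq (ngrams doc : List String) :
    ngrams.foldl (fun s ng1 =>
        doc.foldl (fun s ng2 => if ng1 == ng2 then s + 1 else s) s) (0 : Int)
    = pvMerge (PySem.List.sorted ngrams (fun x => x) false)
              (PySem.List.sorted doc (fun x => x) false) := by
  have hperm_n : (PySem.List.sorted ngrams (fun x => x) false).Perm ngrams :=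
    PySem.List.sorted_perm ngrams (fun x => x) false
  have hperm_d : (PySem.List.sorted doc (fun x => x) false).Perm doc :=
    PySem.List.sorted_perm doc (fun x => x) false
  have hpn : (PySem.List.sorted ngrams (fun x => x) false).Pairwise (· ≤ ·) := by
    simpa using PySem.List.sorted_pairwise ngrams (fun x => x)
  have hpd : (PySem.List.sorted doc (fun x => x) false).Pairwise (· ≤ ·) := by
    simpa using PySem.List.sorted_pairwise doc (fun x => x)
  rw [pv_score_sum, pv_merge_eq _ _ hpn hpd]
  have hcnt : ∀ x : String,
      ((PySem.List.sorted doc (fun x => x) false).count x : Int) = (doc.count x : Int) := by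
    intro x; exact congrArg Nat.cast (hperm_d.count_eq x)
  calc ((ngrams.map fun x => (doc.count x : Int)).sum)
      = (((PySem.List.sorted ngrams (fun x => x) false).map fun x => (doc.count x : Int)).sum) :=
        (List.Perm.sum_eq (hperm_n.map _)).symm
    _ = (((PySem.List.sorted ngrams (fun x => x) false).map
          fun x => ((PySem.List.sorted doc (fun x => x) false).count x : Int)).sum) := by
        apply congrArg; apply List.map_congr_left; intro x _; exact (hcnt x).symm

-- ===== VERDICT (by name: the statement is the Claim_ definition above) =====
theorem decide_nearest_spec : Claim_equal_decide_nearest := by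
  intro profiles_ document_profile _ hpre
  unfold Spec_decide_nearest decide_nearest decide_nearest_alt
  congr 1
  rw [List.map_map]
  apply List.map_congr_left
  intro kv hmem
  simp only [Function.comp_apply]
  rw [pv_find_self profiles_ kv hpre hmem, pv_score_eq]
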